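-- pv_equiv track=rewrite | github.com/rgoj/phd_code | util/run_fitting_schemes.py | def_all_models_dict
-- ===== SOURCE A (Python) =====
-- def def_all_models_dict(schemes, model_types, number_of_generators,
--                         random_seeds):
--     """
--     The all_models dictionary will hold all ERP model objects after fitting
--     along with information about the fitting procedures performed and the final
--     results.
--
--     Each ERP model object will be held in a separate entry for model type,
--     number of generators and randomization seed, such that:
--
--         all_models[scheme][model_type][n_gen][seed]
--
--     will hold an ERP model object and other information in the dictionary
--     defined by:
--
--         empty_entry = def_empty_entry_dict()
--     """
--     all_models = {}
--     for scheme in schemes: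
--         all_models[scheme] = {}
--         for model_type in model_types:
--             all_models[scheme][model_type] = {}
--             for n_gen in number_of_generators:
--                 all_models[scheme][model_type][n_gen] = {}
--                 for seed in random_seeds:
--                     all_models[scheme][model_type][n_gen][seed] = None
--     return all_models
-- ===== SOURCE B (Python) =====
-- def def_all_models_dict(schemes, model_types, number_of_generators,
--                         random_seeds):
--     def build(dimensions):
--         if not dimensions:
--             return None
--         first, rest = dimensions[0], dimensions[1:]
--         return {key: build(rest) for key in first}
--
--     return build([schemes, model_types, number_of_generators, random_seeds])
-- ===== Notes on version B (the rewrite author's own statement) =====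
-- stated objective: alternative
-- what changed: A single recursive helper consumes the list of dimension-iterables, building each level as a dict comprehension over the first dimension, instead of four hand-written nested loops with repeated subscripting.
import Mathlib
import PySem

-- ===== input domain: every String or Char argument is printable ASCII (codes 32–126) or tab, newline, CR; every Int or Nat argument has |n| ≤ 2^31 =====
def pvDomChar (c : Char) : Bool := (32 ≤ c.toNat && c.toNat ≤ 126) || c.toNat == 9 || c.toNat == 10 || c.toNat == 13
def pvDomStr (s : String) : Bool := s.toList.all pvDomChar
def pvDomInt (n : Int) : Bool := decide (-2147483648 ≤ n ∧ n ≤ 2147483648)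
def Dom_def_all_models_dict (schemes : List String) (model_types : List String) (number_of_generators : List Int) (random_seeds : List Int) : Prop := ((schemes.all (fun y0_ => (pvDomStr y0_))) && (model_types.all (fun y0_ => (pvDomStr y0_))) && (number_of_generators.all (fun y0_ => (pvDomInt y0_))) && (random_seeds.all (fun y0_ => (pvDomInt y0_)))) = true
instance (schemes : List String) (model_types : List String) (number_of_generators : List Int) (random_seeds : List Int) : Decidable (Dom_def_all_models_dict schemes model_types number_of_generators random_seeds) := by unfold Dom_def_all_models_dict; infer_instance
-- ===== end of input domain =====

-- B replaces A's four hand-written nested loops by a single recursive descent over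
-- the list of dimensions, one dict comprehension per level (same cost, different decomposition).

-- ===== PORT A =====
-- Port of A: four nested loops, each inserting a freshly built inner dict.
def def_all_models_dict (schemes : List String) (model_types : List String) (number_of_generators : List Int) (random_seeds : List Int) : List (String × List (String × List (Int × List (Int × Option String)))) :=
  (schemes.foldl (fun acc scheme =>
    acc.insert scheme
      ((model_types.foldl (fun acc2 mt =>
        acc2.insert mt
          ((number_of_generators.foldl (fun acc3 n =>
            acc3.insert n
              ((random_seeds.foldl (fun acc4 s => acc4.insert s (none : Option String))
                PySem.Dict.empty).items))
            PySem.Dict.empty).items))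
        PySem.Dict.empty).items))
    PySem.Dict.empty).items

-- ===== PORT B =====
-- B's levels: '{key: build(rest) for key in first}', a dict comprehension whose value
-- does not depend on the key.  Lean is typed, so B's recursion over the heterogeneous
-- four-element dimension list is unrolled into its four instantiations of one
-- polymorphic comprehension helper.
-- {k: f(k) for k in keys}: distinct keys in first-occurrence order.
def pyDictComp {α β : Type} [BEq α] (keys : List α) (f : α → β) : List (α × β) :=
  (PySem.Set.ofList keys).map (fun k => (k, f k))

def def_all_models_dict_alt (schemes : List String) (model_types : List String) (number_of_generators : List Int) (random_seeds : List Int) : List (String × List (String × List (Int × List (Int × Option String)))) :=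
  pyDictComp schemes (fun _ =>
    pyDictComp model_types (fun _ =>
      pyDictComp number_of_generators (fun _ =>
        pyDictComp random_seeds (fun _ => (none : Option String)))))

-- ===== PRECONDITION & SPEC =====
def Spec_def_all_models_dict (schemes : List String) (model_types : List String) (number_of_generators : List Int) (random_seeds : List Int) (out : List (String × List (String × List (Int × List (Int × Option String))))) : Prop := out = def_all_models_dict_alt schemes model_types number_of_generators random_seeds
instance (schemes : List String) (model_types : List String) (number_of_generators : List Int) (random_seeds : List Int) (out : List (String × List (String × List (Int × List (Int × Option String))))) : Decidable (Spec_def_all_models_dict schemes model_types number_of_generators random_seeds out) := by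
  unfold Spec_def_all_models_dict
  haveI h1 : DecidableEq (List (Int × Option String)) := by infer_instance
  haveI h2 : DecidableEq (List (Int × List (Int × Option String))) := by infer_instance
  haveI h3 : DecidableEq (List (String × List (Int × List (Int × Option String)))) := by infer_instance
  infer_instance

-- ===== CLAIM (what is proved, stated in full; the proofs are below) =====
def Claim_equal_def_all_models_dict : Prop := ∀ (schemes : List String) (model_types : List String) (number_of_generators : List Int) (random_seeds : List Int), Dom_def_all_models_dict schemes model_types number_of_generators random_seeds → Spec_def_all_models_dict schemes model_types number_of_generators random_seeds (def_all_models_dict schemes model_types number_of_generators random_seeds)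

-- ===== LEMMAS AND PROOFS =====

-- A fold of inserts of one constant value v, started from a dict whose items are s.map (k, v),
-- ends with items (Set.update s l).map (k, v).
theorem items_foldl_insert_const {α β : Type} [BEq α] [LawfulBEq α] (v : β) (l s : List α) :
    (l.foldl (fun d k => d.insert k v) (PySem.Dict.mk (s.map (fun k => (k, v))))).items
      = (PySem.Set.update s l).map (fun k => (k, v)) := by
  induction l generalizing s with
  | nil => simp [PySem.Set.update]
  | cons x xs ih =>
    by_cases hx : x ∈ s
    · have hc : (PySem.Dict.mk (s.map (fun k => (k, v)))).contains x = true := by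
        simp [hx]
      have hitems : ((PySem.Dict.mk (s.map (fun k => (k, v)))).insert x v).items
          = s.map (fun k => (k, v)) := by
        rw [PySem.Dict.items_insert, hc]
        simp only [if_true, List.map_map]
        apply List.map_congr_left
        intro a _
        by_cases h : a = x <;> simp [h]
      have : ((PySem.Dict.mk (s.map (fun k => (k, v)))).insert x v)
          = PySem.Dict.mk (s.map (fun k => (k, v))) := by
        apply PySem.Dict.ext; exact hitems
      simp only [List.foldl_cons, this, ih, PySem.Set.update_cons, PySem.Set.add_of_mem hx]
    · have hc : (PySem.Dict.mk (s.map (fun k => (k, v)))).contains x = false := by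
        simp
        intro a ha; exact fun h => (hx (h ▸ ha)).elim
      have hitems : ((PySem.Dict.mk (s.map (fun k => (k, v)))).insert x v)
          = PySem.Dict.mk ((s ++ [x]).map (fun k => (k, v))) := by
        apply PySem.Dict.ext
        rw [PySem.Dict.items_insert, hc]
        simp
      simp only [List.foldl_cons, hitems, ih, PySem.Set.update_cons,
        PySem.Set.add_of_not_mem hx]

-- from the empty dict: items = the constant-valued comprehension over l
theorem items_foldl_insert_const_empty {α β : Type} [BEq α] [LawfulBEq α] (v : β) (l : List α) :
    (l.foldl (fun d k => d.insert k v) PySem.Dict.empty).items = pyDictComp l (fun _ => v) := by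
  have h := items_foldl_insert_const v l []
  simpa [pyDictComp, PySem.Set.update, PySem.Set.ofList_eq_foldl, PySem.Dict.empty] using h

-- ===== VERDICT (by name: the statement is the Claim_ definition above) =====
theorem def_all_models_dict_spec : Claim_equal_def_all_models_dict := by
  intro schemes model_types number_of_generators random_seeds _
  unfold Spec_def_all_models_dict def_all_models_dict def_all_models_dict_alt
  simp only [items_foldl_insert_const_empty]
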